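-- pv_equiv track=rewrite | github.com/SailfinIO/sailfin | tools/prepare_stage2_aot_text.py | _rename_symbol_refs
-- ===== SOURCE A (Python) =====
-- def _rename_symbol_refs(ir: str, old: str, new: str) -> str:
--     """Replace exact `@old` symbol references (not `@old.suffix`).
--
--     Important: do not rewrite inside LLVM IR string literals (e.g. c"...")
--     because changing bytes there will invalidate the declared array length.
--     """
--
--     def is_symbol_char(ch: str) -> bool:
--         return ch.isalnum() or ch in "_.$."
--
--     out: list[str] = []
--     i = 0
--     in_quote = False
--     old_len = len(old)
--     while i < len(ir):
--         ch = ir[i]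
--
--         if ch == '"':
--             # Toggle quote mode when the quote is not escaped.
--             backslashes = 0
--             j = i - 1
--             while j >= 0 and ir[j] == "\\":
--                 backslashes += 1
--                 j -= 1
--             if backslashes % 2 == 0:
--                 in_quote = not in_quote
--             out.append(ch)
--             i += 1
--             continue
--
--         if not in_quote and ch == "@" and ir.startswith(old, i + 1):
--             end = i + 1 + old_len
--             if end >= len(ir) or not is_symbol_char(ir[end]):
--                 out.append("@" + new)
--                 i = end
--                 continue
--
--         out.append(ch)
--         i += 1
--
--     return "".join(out)
-- ===== SOURCE B (Python) =====
-- def _rename_symbol_refs(ir: str, old: str, new: str) -> str: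
--     """Two-phase re-implementation: first split the IR into alternating
--     code / string-literal segments (a quote toggles only after an even run
--     of backslashes), then rewrite `@old` references with a find-based scan
--     inside the code segments only, and join."""
--
--     def _segments(s: str) -> list[tuple[bool, str]]:
--         segs: list[tuple[bool, str]] = []
--         cur: list[str] = []
--         in_quote = False
--         run = 0  # length of the backslash run ending just before this char
--         for ch in s:
--             if ch == '"' and run % 2 == 0:
--                 if in_quote:
--                     cur.append(ch)
--                     segs.append((True, "".join(cur)))
--                     cur = []
--                 else:
--                     segs.append((False, "".join(cur)))
--                     cur = [ch]
--                 in_quote = not in_quote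
--                 run = 0
--             else:
--                 cur.append(ch)
--                 run = run + 1 if ch == "\\" else 0
--         segs.append((in_quote, "".join(cur)))
--         return segs
--
--     def _is_symbol_char(ch: str) -> bool:
--         return ch.isalnum() or ch in "_.$"
--
--     target = "@" + old
--     rep = "@" + new
--
--     def _replace_code(piece: str) -> str:
--         res: list[str] = []
--         pos = 0
--         search = 0
--         while True:
--             k = piece.find(target, search)
--             if k < 0:
--                 res.append(piece[pos:])
--                 break
--             end = k + len(target)
--             if end >= len(piece) or not _is_symbol_char(piece[end]):
--                 res.append(piece[pos:k])
--                 res.append(rep)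
--                 pos = end
--                 search = end
--             else:
--                 search = k + 1
--         return "".join(res)
--
--     return "".join(p if is_str else _replace_code(p) for is_str, p in _segments(ir))
-- ===== Notes on version B (the rewrite author's own statement) =====
-- stated objective: faster
-- what changed: Replaces A's single char-by-char loop with a running in_quote flag and backward backslash counting by a two-phase pass: first segment the IR into alternating code/string-literal pieces (forward escape-run tracking), then rewrite @old inside code pieces only with a find-and-jump scan (str.find), and join.
-- outside the precondition, e.g. on _rename_symbol_refs('@"', '"', 'x'): A returns '@x', B returns '@"'
import Mathlib
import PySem

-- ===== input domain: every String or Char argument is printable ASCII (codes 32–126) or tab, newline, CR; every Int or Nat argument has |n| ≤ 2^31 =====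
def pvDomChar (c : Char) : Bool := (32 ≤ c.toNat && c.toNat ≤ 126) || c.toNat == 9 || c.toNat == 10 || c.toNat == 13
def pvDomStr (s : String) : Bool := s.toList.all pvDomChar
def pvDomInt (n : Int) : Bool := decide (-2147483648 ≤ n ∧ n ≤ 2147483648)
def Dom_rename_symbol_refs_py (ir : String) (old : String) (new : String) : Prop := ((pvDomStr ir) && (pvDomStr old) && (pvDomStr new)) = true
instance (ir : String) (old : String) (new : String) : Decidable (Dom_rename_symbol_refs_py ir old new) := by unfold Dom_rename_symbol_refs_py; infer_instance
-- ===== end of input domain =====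

-- B re-implements A's one-pass quote-tracking rename as a two-phase pass (segment into
-- code/string pieces, then find-based rewrite inside code pieces); equivalence is proved
-- for old symbol names not containing '"' (Pre_), where A's quote tracking is accidental.

-- ===== PORT A =====

-- Python: ch.isalnum() or ch in "_.$."   (isalnum is [0-9A-Za-z] on the ASCII domain)
def pvIsSym (c : Char) : Bool := c.isAlphanum || ("_.$.".toList.contains c)

-- A's backward backslash-counting loop: number of consecutive '\' at positions i-1, i-2, …
def pvBsA (ir : List Char) : Nat → Nat
  | 0 => 0
  | i+1 => if ir.getD i ' ' = '\\' then pvBsA ir i + 1 else 0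

-- A's while loop, step for step (i, in_quote, out)
def pvLoopA (ir old new : List Char) (i : Nat) (inq : Bool) (out : List Char) : List Char :=
  if h : i < ir.length then
    if ir[i] = '"' then
      pvLoopA ir old new (i+1) (if pvBsA ir i % 2 = 0 then !inq else inq) (out ++ [ir[i]])
    else if inq = false ∧ ir[i] = '@' ∧ old.isPrefixOf (ir.drop (i+1)) then
      if i + 1 + old.length ≥ ir.length ∨ pvIsSym (ir.getD (i + 1 + old.length) ' ') = false then
        pvLoopA ir old new (i + 1 + old.length) inq (out ++ '@' :: new)
      else
        pvLoopA ir old new (i+1) inq (out ++ [ir[i]])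
    else
      pvLoopA ir old new (i+1) inq (out ++ [ir[i]])
  else out
termination_by ir.length - i
decreasing_by all_goals omega

def rename_symbol_refs_py (ir : String) (old : String) (new : String) : String :=
  String.mk (pvLoopA ir.toList old.toList new.toList 0 false [])

-- ===== PORT B =====

-- B's segmentation pass: split into alternating code/string pieces; a '"' toggles only
-- after an even run of backslashes; string pieces carry both delimiting quotes.
def pvSegs (cs : List Char) (cur : List Char) (inq : Bool) (run : Nat) : List (Bool × List Char) :=
  match cs with
  | [] => [(inq, cur)]
  | c :: rest =>
    if c = '"' ∧ run % 2 = 0 then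
      if inq then (true, cur ++ [c]) :: pvSegs rest [] false 0
      else (false, cur) :: pvSegs rest [c] true 0
    else pvSegs rest (cur ++ [c]) inq (if c = '\\' then run + 1 else 0)

-- piece.find(target, s) for a NONEMPTY target: smallest k ≥ s where target occurs, else none
-- (hand port of str.find; exact for the nonempty needles '@'+old B uses)
def pvFind (piece target : List Char) (s : Nat) : Option Nat :=
  if target.isPrefixOf (piece.drop s) then some s
  else if h : s < piece.length then pvFind piece target (s+1) else none
termination_by piece.length - s

-- pvRepl's termination needs this spec of pvFind (cited in decreasing_by)
theorem pvFind_spec_le (piece target : List Char) (s k : Nat) (ht : target ≠ [])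
    (hf : pvFind piece target s = some k) : s ≤ k ∧ k + target.length ≤ piece.length := by
  fun_induction pvFind piece target s with
  | case1 s hp =>
    simp only [Option.some.injEq] at hf
    subst hf
    refine ⟨le_refl _, ?_⟩
    have := (List.isPrefixOf_iff_prefix.mp hp).length_le
    simp at this
    have ht' : 0 < target.length := List.length_pos_of_ne_nil ht
    omega
  | case2 s hp h ih =>
    have := ih hf
    omega
  | case3 s hp h =>
    simp at hf

-- B's find-and-jump rewrite loop over one code piece
def pvRepl (piece old new : List Char) (pos search : Nat) (res : List Char) : List Char :=
  match hf : pvFind piece ('@' :: old) search with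
  | none => res ++ piece.drop pos
  | some k =>
    if k + ('@' :: old).length ≥ piece.length ∨
        pvIsSym (piece.getD (k + ('@' :: old).length) ' ') = false then
      pvRepl piece old new (k + ('@' :: old).length) (k + ('@' :: old).length)
        (res ++ (piece.drop pos).take (k - pos) ++ '@' :: new)
    else pvRepl piece old new pos (k+1) res
termination_by piece.length + 1 - search
decreasing_by
  · have h := pvFind_spec_le piece ('@' :: old) search k (by simp) hf
    simp at h ⊢; omega
  · have h := pvFind_spec_le piece ('@' :: old) search k (by simp) hf
    simp at h ⊢; omega

def rename_symbol_refs_py_alt (ir : String) (old : String) (new : String) : String :=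
  String.mk (((pvSegs ir.toList [] false 0).map
    (fun s => if s.1 then s.2 else pvRepl s.2 old.toList new.toList 0 0 [])).flatten)

-- ===== PRECONDITION & SPEC =====
-- Pre_ excludes old symbol names containing '"': there A can consume a quote inside a
-- matched reference and lose quote tracking, an accidental corner no caller would specify.
def Pre_rename_symbol_refs_py (ir : String) (old : String) (new : String) : Prop :=
  '"' ∉ old.toList
instance (ir : String) (old : String) (new : String) : Decidable (Pre_rename_symbol_refs_py ir old new) := by unfold Pre_rename_symbol_refs_py; infer_instance

def pvWitness_rename_symbol_refs_py : String × String × String := ("@foo = call @f(@foo.x, c\"@foo\")", "foo", "bar")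

def Spec_rename_symbol_refs_py (ir : String) (old : String) (new : String) (out : String) : Prop := out = rename_symbol_refs_py_alt ir old new
instance (ir : String) (old : String) (new : String) (out : String) : Decidable (Spec_rename_symbol_refs_py ir old new out) := by unfold Spec_rename_symbol_refs_py; infer_instance

-- ===== CLAIM (what is proved, stated in full; the proofs are below) =====
def Claim_equal_rename_symbol_refs_py : Prop := ∀ (ir : String) (old : String) (new : String), Dom_rename_symbol_refs_py ir old new → Pre_rename_symbol_refs_py ir old new → Spec_rename_symbol_refs_py ir old new (rename_symbol_refs_py ir old new)

-- ===== LEMMAS AND PROOFS =====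

-- run of '\' at the end of l, after seeding run r (forward form of A's backward count)
def pvRunA (r : Nat) (l : List Char) : Nat := l.foldl (fun r c => if c = '\\' then r + 1 else 0) r
def pvRun (l : List Char) : Nat := pvRunA 0 l

-- A's loop restated structurally on the remaining suffix, carrying the backslash run
def pvLoopS (old new : List Char) : List Char → Nat → Bool → List Char
  | [], _, _ => []
  | c :: rest, run, inq =>
    if c = '"' then c :: pvLoopS old new rest 0 (if run % 2 = 0 then !inq else inq)
    else if inq = false ∧ c = '@' ∧ old.isPrefixOf rest ∧
        (old.length ≥ rest.length ∨ pvIsSym (rest.getD old.length ' ') = false) then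
      '@' :: new ++ pvLoopS old new (rest.drop old.length) (pvRun old) inq
    else c :: pvLoopS old new rest (if c = '\\' then run + 1 else 0) inq
termination_by cs => cs.length
decreasing_by all_goals first
  | (simp; omega)
  | simp
  | omega

-- char-stepping rewrite of a quote-free piece (reference between loopS and pvRepl)
def pvStep (old new : List Char) : List Char → List Char
  | [] => []
  | c :: rest =>
    if c = '@' ∧ old.isPrefixOf rest ∧
        (old.length ≥ rest.length ∨ pvIsSym (rest.getD old.length ' ') = false) then
      '@' :: new ++ pvStep old new (rest.drop old.length)
    else c :: pvStep old new rest
termination_by cs => cs.length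
decreasing_by all_goals first
  | (simp; omega)
  | simp
  | omega

-- index of the first quote preceded by an even backslash run (given seed run)
def pvFq : List Char → Nat → Option Nat
  | [], _ => none
  | c :: rest, run =>
    if c = '"' ∧ run % 2 = 0 then some 0
    else (pvFq rest (if c = '\\' then run + 1 else 0)).map (· + 1)

-- a successful replacement site of the step scan at index m of piece
def pvSucc (old piece : List Char) (m : Nat) : Prop :=
  ('@' :: old).isPrefixOf (piece.drop m) ∧
    (m + 1 + old.length ≥ piece.length ∨ pvIsSym (piece.getD (m + 1 + old.length) ' ') = false)

def pvRender (old new : List Char) (l : List (Bool × List Char)) : List Char :=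
  (l.map (fun s => if s.1 then s.2 else pvRepl s.2 old new 0 0 [])).flatten

-- --- pvRunA facts ---
theorem pvRunA_snoc (r : Nat) (l : List Char) (c : Char) :
    pvRunA r (l ++ [c]) = if c = '\\' then pvRunA r l + 1 else 0 := by
  simp [pvRunA]

theorem pvRunA_append (r : Nat) (l₁ l₂ : List Char) :
    pvRunA r (l₁ ++ l₂) = pvRunA (pvRunA r l₁) l₂ := by
  simp [pvRunA]

theorem pvRunA_at_old (r : Nat) (old : List Char) :
    pvRunA r ('@' :: old) = pvRun old := by
  simp [pvRunA, pvRun]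

theorem pvBsA_eq_run (ir : List Char) (i : Nat) (h : i ≤ ir.length) :
    pvBsA ir i = pvRun (ir.take i) := by
  induction i with
  | zero => rfl
  | succ i ih =>
    have hi : i < ir.length := by omega
    have ht : ir.take (i+1) = ir.take i ++ [ir[i]] := by
      rw [List.take_succ]
      simp [List.getElem?_eq_getElem hi]
    rw [pvBsA, ht]
    unfold pvRun
    rw [pvRunA_snoc]
    rw [ih (by omega)]
    simp [List.getD_eq_getElem?_getD, List.getElem?_eq_getElem hi]
    rfl

-- --- pvFind specs ---
theorem pvFind_none (piece target : List Char) (s : Nat) (ht : target ≠ [])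
    (hf : pvFind piece target s = none) : ∀ m, s ≤ m → ¬ target <+: piece.drop m := by
  fun_induction pvFind piece target s with
  | case1 s hp => simp at hf
  | case2 s hp h ih =>
    intro m hm
    rcases Nat.eq_or_lt_of_le hm with rfl | hlt
    · exact fun hc => hp (List.isPrefixOf_iff_prefix.mpr hc)
    · exact ih hf m hlt
  | case3 s hp h =>
    intro m hm hc
    have : piece.drop m = [] := List.drop_eq_nil_of_le (by omega)
    rw [this] at hc
    exact ht (List.prefix_nil.mp hc)

theorem pvFind_some (piece target : List Char) (s k : Nat)
    (hf : pvFind piece target s = some k) :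
    target <+: piece.drop k ∧ ∀ m, s ≤ m → m < k → ¬ target <+: piece.drop m := by
  fun_induction pvFind piece target s with
  | case1 s hp =>
    simp only [Option.some.injEq] at hf
    subst hf
    exact ⟨List.isPrefixOf_iff_prefix.mp hp, fun m h1 h2 => by omega⟩
  | case2 s hp h ih =>
    obtain ⟨h1, h2⟩ := ih hf
    refine ⟨h1, fun m hm hmk => ?_⟩
    rcases Nat.eq_or_lt_of_le hm with rfl | hlt
    · exact fun hc => hp (List.isPrefixOf_iff_prefix.mpr hc)
    · exact h2 m hlt hmk
  | case3 s hp h => simp at hf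

-- --- pvSucc vs the head decision of pvStep ---
theorem pvSucc_head (old piece : List Char) (m : Nat) (h : m < piece.length) :
    pvSucc old piece m ↔ (piece[m] = '@' ∧ old.isPrefixOf (piece.drop (m+1)) ∧
      (old.length ≥ (piece.drop (m+1)).length ∨
        pvIsSym ((piece.drop (m+1)).getD old.length ' ') = false)) := by
  have e2 : piece.getD (m + 1 + old.length) ' ' = (piece.drop (m+1)).getD old.length ' ' := by
    simp [List.getD_eq_getElem?_getD, List.getElem?_drop]
  have e3 : (m + 1 + old.length ≥ piece.length) ↔ (old.length ≥ (piece.drop (m+1)).length) := by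
    simp [List.length_drop]; omega
  unfold pvSucc
  rw [List.drop_eq_getElem_cons h, e2]
  constructor
  · rintro ⟨hp, hb⟩
    have hp' := List.isPrefixOf_iff_prefix.mp hp
    rw [List.cons_prefix_cons] at hp'
    refine ⟨hp'.1.symm, List.isPrefixOf_iff_prefix.mpr hp'.2, ?_⟩
    rcases hb with hb | hb
    · exact Or.inl (e3.mp hb)
    · exact Or.inr hb
  · rintro ⟨h1, h2, h3⟩
    refine ⟨?_, ?_⟩
    · exact List.isPrefixOf_iff_prefix.mpr
        (List.cons_prefix_cons.mpr ⟨h1.symm, List.isPrefixOf_iff_prefix.mp h2⟩)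
    · rcases h3 with h3 | h3
      · exact Or.inl (e3.mpr h3)
      · exact Or.inr h3

theorem pvStep_copy (old new piece : List Char) (pos : Nat)
    (h : ∀ m, pos ≤ m → ¬ pvSucc old piece m) :
    pvStep old new (piece.drop pos) = piece.drop pos := by
  have key : ∀ n pos, piece.length - pos ≤ n → (∀ m, pos ≤ m → ¬ pvSucc old piece m) →
      pvStep old new (piece.drop pos) = piece.drop pos := by
    intro n
    induction n with
    | zero =>
      intro pos hn _
      have : piece.drop pos = [] := List.drop_eq_nil_of_le (by omega)
      rw [this]; simp [pvStep]
    | succ n ih =>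
      intro pos hn hinv
      by_cases hlt : pos < piece.length
      · rw [List.drop_eq_getElem_cons hlt, pvStep]
        rw [if_neg]
        · rw [ih (pos+1) (by omega) (fun m hm => hinv m (by omega))]
        · intro hc
          exact hinv pos (le_refl _) ((pvSucc_head old piece pos hlt).mpr hc)
      · have : piece.drop pos = [] := List.drop_eq_nil_of_le (by omega)
        rw [this]; simp [pvStep]
  exact key piece.length pos (by omega) h

theorem pvStep_match (old new piece : List Char) (pos k : Nat) (hpk : pos ≤ k)
    (hnone : ∀ m, pos ≤ m → m < k → ¬ pvSucc old piece m) (hk : pvSucc old piece k) :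
    pvStep old new (piece.drop pos) =
      (piece.drop pos).take (k - pos) ++ '@' :: new ++ pvStep old new (piece.drop (k + 1 + old.length)) := by
  have hklen : k < piece.length := by
    by_contra hge
    have hnil : piece.drop k = [] := List.drop_eq_nil_of_le (by omega)
    have hp := hk.1
    rw [hnil] at hp
    simp [List.isPrefixOf] at hp
  have key : ∀ n pos, k - pos ≤ n → pos ≤ k →
      (∀ m, pos ≤ m → m < k → ¬ pvSucc old piece m) →
      pvStep old new (piece.drop pos) =
        (piece.drop pos).take (k - pos) ++ '@' :: new ++ pvStep old new (piece.drop (k + 1 + old.length)) := by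
    intro n
    induction n with
    | zero =>
      intro pos hn hpk _
      have hpos : pos = k := by omega
      subst hpos
      obtain ⟨h1, h2, h3⟩ := (pvSucc_head old piece pos hklen).mp hk
      rw [List.drop_eq_getElem_cons hklen, pvStep, if_pos ⟨h1, h2, h3⟩]
      have hd : (piece.drop (pos+1)).drop old.length = piece.drop (pos + 1 + old.length) := by
        rw [List.drop_drop]; try (congr 1; omega)
      rw [hd]
      simp
    | succ n ih =>
      intro pos hn hpk hinv
      rcases Nat.eq_or_lt_of_le hpk with rfl | hlt
      · exact ih pos (by omega) (le_refl _) hinv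
      · have hplen : pos < piece.length := by omega
        rw [List.drop_eq_getElem_cons hplen, pvStep]
        rw [if_neg]
        · rw [ih (pos+1) (by omega) (by omega) (fun m hm => hinv m (by omega))]
          have hkp : k - pos = (k - (pos+1)) + 1 := by omega
          rw [hkp, List.take_succ_cons]
          simp
        · intro hc
          exact hinv pos (le_refl _) hlt ((pvSucc_head old piece pos hplen).mpr hc)
  exact key k pos (by omega) hpk hnone

-- --- pvRepl equals the step scan ---
theorem pvSucc_lt (old piece : List Char) (m : Nat) (h : pvSucc old piece m) :
    m < piece.length := by
  by_contra hge
  have hnil : piece.drop m = [] := List.drop_eq_nil_of_le (by omega)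
  have hp := h.1
  rw [hnil] at hp
  simp [List.isPrefixOf] at hp

theorem pvRepl_eq_step (piece old new : List Char) (pos search : Nat) (res : List Char)
    (hps : pos ≤ search) (hinv : ∀ m, pos ≤ m → m < search → ¬ pvSucc old piece m) :
    pvRepl piece old new pos search res = res ++ pvStep old new (piece.drop pos) := by
  have key : ∀ n pos search res, piece.length + 1 - search ≤ n → pos ≤ search →
      (∀ m, pos ≤ m → m < search → ¬ pvSucc old piece m) →
      pvRepl piece old new pos search res = res ++ pvStep old new (piece.drop pos) := by
    intro n
    induction n with
    | zero =>
      intro pos search res hn hps hinv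
      have hfnone : pvFind piece ('@' :: old) search = none := by
        rw [pvFind]
        have hd : piece.drop search = [] := List.drop_eq_nil_of_le (by omega)
        rw [hd, if_neg (by simp [List.isPrefixOf]), dif_neg (by omega)]
      rw [pvRepl]
      split
      · rw [pvStep_copy old new piece pos (fun m hm hs => by
          rcases Nat.lt_or_ge m search with hlt | hge
          · exact hinv m hm hlt hs
          · exact absurd (pvSucc_lt old piece m hs) (by omega))]
      · rename_i k heq
        rw [hfnone] at heq
        simp at heq
    | succ n ih =>
      intro pos search res hn hps hinv
      rw [pvRepl]
      split
      · rename_i heq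
        rw [pvStep_copy old new piece pos (fun m hm hs => by
          rcases Nat.lt_or_ge m search with hlt | hge
          · exact hinv m hm hlt hs
          · exact absurd (List.isPrefixOf_iff_prefix.mp hs.1)
              (pvFind_none piece ('@' :: old) search (by simp) heq m hge))]
      · rename_i k heq
        obtain ⟨hpref, hmin⟩ := pvFind_some piece ('@' :: old) search k heq
        have hsk : search ≤ k := (pvFind_spec_le piece ('@' :: old) search k (by simp) heq).1
        have hke : k + ('@' :: old).length ≤ piece.length :=
          (pvFind_spec_le piece ('@' :: old) search k (by simp) heq).2
        have hnosucc : ∀ m, pos ≤ m → m < k → ¬ pvSucc old piece m := by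
          intro m hm hmk hs
          rcases Nat.lt_or_ge m search with hlt | hge
          · exact hinv m hm hlt hs
          · exact hmin m hge hmk (List.isPrefixOf_iff_prefix.mp hs.1)
        have hidx : k + ('@' :: old).length = k + 1 + old.length := by simp; omega
        split_ifs with hb
        · -- successful replacement at k
          have hsucck : pvSucc old piece k := by
            refine ⟨List.isPrefixOf_iff_prefix.mpr hpref, ?_⟩
            rw [hidx] at hb
            rcases hb with hb | hb
            · exact Or.inl hb
            · exact Or.inr hb
          rw [ih (k + ('@' :: old).length) (k + ('@' :: old).length)
              (res ++ (piece.drop pos).take (k - pos) ++ '@' :: new)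
              (by simp at hke ⊢; omega) (le_refl _) (fun m h1 h2 => by omega)]
          rw [pvStep_match old new piece pos k (by omega) hnosucc hsucck]
          rw [hidx]
          simp
        · -- occurrence at k but boundary fails: resume search at k+1
          have hklen : k < piece.length := by
            have := hpref.length_le
            simp [List.length_drop] at this
            omega
          refine ih pos (k+1) res (by omega) (by omega) ?_
          intro m hm hmk hs
          rcases Nat.lt_or_ge m k with hlt | hge
          · exact hnosucc m hm hlt hs
          · have hmkeq : m = k := by omega
            subst hmkeq
            rw [hidx] at hb
            push_neg at hb
            rcases hs.2 with h2 | h2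
            · omega
            · rw [h2] at hb
              simp at hb
  exact key (piece.length + 1) pos search res (by omega) hps hinv

-- --- pvFq facts ---
theorem pvFq_at (cs : List Char) (run q : Nat) (h : pvFq cs run = some q) :
    q < cs.length ∧ cs.getD q ' ' = '"' := by
  induction cs generalizing run q with
  | nil => simp [pvFq] at h
  | cons c rest ih =>
    rw [pvFq] at h
    by_cases hc : (c = '"' ∧ run % 2 = 0)
    · rw [if_pos hc] at h
      simp only [Option.some.injEq] at h
      subst h
      exact ⟨by simp, by simpa [List.getD] using hc.1⟩
    · rw [if_neg hc] at h
      rcases ho : pvFq rest (if c = '\\' then run + 1 else 0) with _ | q'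
      · rw [ho] at h; simp at h
      · rw [ho] at h
        simp only [Option.map_some, Option.some.injEq] at h
        subst h
        obtain ⟨l1, l2⟩ := ih _ _ ho
        exact ⟨by simp; omega, by simpa [List.getD] using l2⟩

theorem pvFq_chunk (chunk rest : List Char) (run : Nat) (hc : '"' ∉ chunk) :
    pvFq (chunk ++ rest) run = (pvFq rest (pvRunA run chunk)).map (· + chunk.length) := by
  induction chunk generalizing run with
  | nil =>
    simp only [List.nil_append, List.length_nil, pvRunA, List.foldl_nil]
    cases pvFq rest run <;> simp
  | cons c chunk' ih =>
    have hcne : c ≠ '"' := fun h => hc (h ▸ List.mem_cons_self)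
    have hc' : '"' ∉ chunk' := fun h => hc (List.mem_cons_of_mem _ h)
    rw [List.cons_append, pvFq, if_neg (by tauto)]
    rw [ih _ hc']
    have hr : pvRunA run (c :: chunk') = pvRunA (if c = '\\' then run + 1 else 0) chunk' := rfl
    rw [hr]
    rcases pvFq rest (pvRunA (if c = '\\' then run + 1 else 0) chunk') with _ | q
    · simp
    · simp
      omega

-- --- chunk lemmas: loopS against fq ---
theorem pvLoopS_code_none (old new : List Char) (hq : '"' ∉ old) :
    ∀ cs run, pvFq cs run = none → pvLoopS old new cs run false = pvStep old new cs := by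
  have key : ∀ n cs run, cs.length ≤ n → pvFq cs run = none →
      pvLoopS old new cs run false = pvStep old new cs := by
    intro n
    induction n with
    | zero =>
      intro cs run hn _
      have : cs = [] := List.eq_nil_of_length_eq_zero (by omega)
      subst this
      simp [pvLoopS, pvStep]
    | succ n ih =>
      intro cs run hn hfq
      cases cs with
      | nil => simp [pvLoopS, pvStep]
      | cons c rest =>
        rw [pvFq] at hfq
        by_cases hc : (c = '"' ∧ run % 2 = 0)
        · rw [if_pos hc] at hfq; simp at hfq
        · rw [if_neg hc] at hfq
          have hfq' : pvFq rest (if c = '\\' then run + 1 else 0) = none := by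
            rcases h : pvFq rest (if c = '\\' then run + 1 else 0) with _ | q
            · rfl
            · rw [h] at hfq; simp at hfq
          by_cases hquote : c = '"'
          · subst hquote
            have hodd : ¬ run % 2 = 0 := by tauto
            have h0 : (if ('"' : Char) = '\\' then run + 1 else 0) = 0 := by simp
            rw [h0] at hfq'
            rw [pvLoopS, if_pos rfl, if_neg hodd, pvStep, if_neg (by simp)]
            rw [ih rest 0 (by simp at hn; omega) hfq']
          · by_cases hC : (c = '@' ∧ old.isPrefixOf rest ∧
                (old.length ≥ rest.length ∨ pvIsSym (rest.getD old.length ' ') = false))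
            · obtain ⟨hat, hpref, hbound⟩ := hC
              subst hat
              have hrest : rest = old ++ rest.drop old.length := by
                conv_lhs => rw [← List.take_append_drop old.length rest]
                rw [← (List.prefix_iff_eq_take.mp (List.isPrefixOf_iff_prefix.mp hpref))]
              have hnq : '"' ∉ ('@' :: old) := by
                intro hm
                simp at hm
                exact hq hm
              have hchunk : pvFq ('@' :: rest) run =
                  (pvFq (rest.drop old.length) (pvRunA run ('@' :: old))).map
                    (· + ('@' :: old).length) := by
                conv_lhs => rw [show ('@' :: rest) = ('@' :: old) ++ rest.drop old.length by
                  rw [List.cons_append, ← hrest]]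
                exact pvFq_chunk ('@' :: old) (rest.drop old.length) run hnq
              rw [pvFq, if_neg hc] at hchunk
              rw [hfq'] at hchunk
              have hfqtail : pvFq (rest.drop old.length) (pvRunA run ('@' :: old)) = none := by
                rcases h : pvFq (rest.drop old.length) (pvRunA run ('@' :: old)) with _ | q
                · rfl
                · rw [h] at hchunk; simp at hchunk
              rw [pvRunA_at_old] at hfqtail
              rw [pvLoopS, if_neg (by simp), if_pos ⟨rfl, rfl, hpref, hbound⟩]
              rw [pvStep, if_pos ⟨rfl, hpref, hbound⟩]
              have hlen : (rest.drop old.length).length ≤ n := by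
                simp at hn ⊢; omega
              rw [ih (rest.drop old.length) (pvRun old) hlen hfqtail]
            · rw [pvLoopS, if_neg hquote, if_neg (by tauto), pvStep, if_neg hC]
              rw [ih rest (if c = '\\' then run + 1 else 0) (by simp at hn; omega) hfq']
  intro cs run hfq
  exact key cs.length cs run (le_refl _) hfq

theorem pvLoopS_code_some (old new : List Char) (hq : '"' ∉ old) :
    ∀ cs run q, pvFq cs run = some q →
      pvLoopS old new cs run false =
        pvStep old new (cs.take q) ++ '"' :: pvLoopS old new (cs.drop (q+1)) 0 true := by
  have hsymq : pvIsSym '"' = false := by decide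
  have key : ∀ n cs run q, cs.length ≤ n → pvFq cs run = some q →
      pvLoopS old new cs run false =
        pvStep old new (cs.take q) ++ '"' :: pvLoopS old new (cs.drop (q+1)) 0 true := by
    intro n
    induction n with
    | zero =>
      intro cs run q hn hfq
      have : cs = [] := List.eq_nil_of_length_eq_zero (by omega)
      subst this
      simp [pvFq] at hfq
    | succ n ih =>
      intro cs run q hn hfq
      have hat0 := pvFq_at cs run q hfq
      cases cs with
      | nil => simp [pvFq] at hfq
      | cons c rest =>
        rw [pvFq] at hfq
        by_cases hc : (c = '"' ∧ run % 2 = 0)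
        · rw [if_pos hc] at hfq
          simp only [Option.some.injEq] at hfq
          subst hfq
          obtain ⟨hc1, hc2⟩ := hc
          subst hc1
          rw [pvLoopS, if_pos rfl, if_pos hc2]
          simp [pvStep]
        · rw [if_neg hc] at hfq
          rcases h' : pvFq rest (if c = '\\' then run + 1 else 0) with _ | q'
          · rw [h'] at hfq; simp at hfq
          · rw [h'] at hfq
            simp only [Option.map_some, Option.some.injEq] at hfq
            subst hfq
            have hq'lt : q' < rest.length := by simp at hat0; omega
            have hatq : rest.getD q' ' ' = '"' := by
              simpa [List.getD] using hat0.2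
            by_cases hquote : c = '"'
            · subst hquote
              have hodd : ¬ run % 2 = 0 := by tauto
              have h0 : pvFq rest 0 = some q' := by simpa using h'
              rw [pvLoopS, if_pos rfl, if_neg hodd]
              rw [ih rest 0 q' (by simp at hn; omega) h0]
              rw [List.take_succ_cons, List.drop_succ_cons, pvStep, if_neg (by simp)]
              simp
            · by_cases hC : (c = '@' ∧ old.isPrefixOf rest ∧
                  (old.length ≥ rest.length ∨ pvIsSym (rest.getD old.length ' ') = false))
              · obtain ⟨hat, hpref, hbound⟩ := hC
                subst hat
                have hprefp := List.isPrefixOf_iff_prefix.mp hpref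
                have hrest : rest = old ++ rest.drop old.length := by
                  conv_lhs => rw [← List.take_append_drop old.length rest]
                  rw [← (List.prefix_iff_eq_take.mp hprefp)]
                have hnq : '"' ∉ old := hq
                have hchunk : pvFq rest (if ('@' : Char) = '\\' then run + 1 else 0) =
                    (pvFq (rest.drop old.length) (pvRun old)).map (· + old.length) := by
                  conv_lhs => rw [hrest]
                  rw [pvFq_chunk old (rest.drop old.length) _ hnq]
                  have hif : (if ('@' : Char) = '\\' then run + 1 else 0) = 0 := by simp
                  rw [hif]
                  rfl
                rw [h'] at hchunk
                rcases ht : pvFq (rest.drop old.length) (pvRun old) with _ | q''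
                · rw [ht] at hchunk; simp at hchunk
                · rw [ht] at hchunk
                  simp only [Option.map_some, Option.some.injEq] at hchunk
                  subst hchunk
                  have htaillen : (rest.drop old.length).length ≤ n := by
                    simp at hn ⊢; omega
                  have holdlt : old.length < rest.length := by
                    by_contra hge
                    have : rest.drop old.length = [] := List.drop_eq_nil_of_le (by omega)
                    rw [this] at ht
                    simp [pvFq] at ht
                  rw [pvLoopS, if_neg (by simp), if_pos ⟨rfl, rfl, hpref, hbound⟩]
                  rw [ih (rest.drop old.length) (pvRun old) q'' htaillen ht]
                  rw [List.take_succ_cons, List.drop_succ_cons]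
                  have hCt : ('@' : Char) = '@' ∧ old.isPrefixOf (rest.take (q'' + old.length)) ∧
                      (old.length ≥ (rest.take (q'' + old.length)).length ∨
                        pvIsSym ((rest.take (q'' + old.length)).getD old.length ' ') = false) := by
                    refine ⟨rfl, List.isPrefixOf_iff_prefix.mpr
                      (List.prefix_take_iff.mpr ⟨hprefp, by omega⟩), ?_⟩
                    rcases Nat.eq_zero_or_pos q'' with hz | hpos
                    · subst hz
                      exact Or.inl (by simp)
                    · refine Or.inr ?_
                      have hb2 : pvIsSym (rest.getD old.length ' ') = false := by
                        rcases hbound with hb | hb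
                        · omega
                        · exact hb
                      have hgd : (rest.take (q'' + old.length)).getD old.length ' ' =
                          rest.getD old.length ' ' := by
                        simp [List.getD_eq_getElem?_getD, List.getElem?_take_of_lt (by omega : old.length < q'' + old.length)]
                      rw [hgd]
                      exact hb2
                  rw [pvStep, if_pos hCt]
                  have hdt : (rest.take (q'' + old.length)).drop old.length =
                      (rest.drop old.length).take q'' := by
                    rw [List.drop_take]
                    congr 1
                    omega
                  have hdd : rest.drop (q'' + old.length + 1) =
                      (rest.drop old.length).drop (q'' + 1) := by
                    rw [List.drop_drop]
                    congr 1
                    omega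
                  rw [hdt, hdd]
                  simp
              · -- no replacement at this position
                have hCt : ¬ (c = '@' ∧ old.isPrefixOf (rest.take q') ∧
                    (old.length ≥ (rest.take q').length ∨
                      pvIsSym ((rest.take q').getD old.length ' ') = false)) := by
                  rintro ⟨hat, hpt, hbt⟩
                  subst hat
                  have hptp := List.prefix_take_iff.mp (List.isPrefixOf_iff_prefix.mp hpt)
                  have hpref : old <+: rest := hptp.1
                  have holdq : old.length ≤ q' := hptp.2
                  have hbound : ¬ (old.length ≥ rest.length ∨
                      pvIsSym (rest.getD old.length ' ') = false) := by
                    intro hb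
                    exact hC ⟨rfl, List.isPrefixOf_iff_prefix.mpr hpref, hb⟩
                  push_neg at hbound
                  obtain ⟨hlt, hsym⟩ := hbound
                  have hsym' : pvIsSym (rest.getD old.length ' ') = true := by
                    rcases hx : pvIsSym (rest.getD old.length ' ') with _ | _
                    · exact absurd hx hsym
                    · rfl
                  rcases Nat.eq_or_lt_of_le holdq with heq | hlt2
                  · rw [← heq] at hatq
                    rw [hatq] at hsym'
                    rw [hsymq] at hsym'
                    exact absurd hsym' (by simp)
                  · have hlen : (rest.take q').length = q' := by simp; omega
                    rcases hbt with hb | hb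
                    · omega
                    · have hgd : (rest.take q').getD old.length ' ' =
                          rest.getD old.length ' ' := by
                        simp [List.getD_eq_getElem?_getD, List.getElem?_take_of_lt hlt2]
                      rw [hgd] at hb
                      rw [hsym'] at hb
                      simp at hb
                rw [pvLoopS, if_neg hquote, if_neg (by tauto)]
                rw [ih rest (if c = '\\' then run + 1 else 0) q' (by simp at hn; omega) h']
                rw [List.take_succ_cons, List.drop_succ_cons, pvStep, if_neg hCt]
                simp
  intro cs run q hfq
  exact key cs.length cs run q (le_refl _) hfq

theorem pvLoopS_str (old new : List Char) :
    ∀ cs run, pvLoopS old new cs run true =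
      (match pvFq cs run with
       | none => cs
       | some q => cs.take q ++ '"' :: pvLoopS old new (cs.drop (q+1)) 0 false) := by
  intro cs
  induction cs with
  | nil => intro run; simp [pvLoopS, pvFq]
  | cons c rest ih =>
    intro run
    by_cases hq : c = '"'
    · subst hq
      by_cases he : run % 2 = 0
      · simp [pvLoopS, pvFq, he]
      · cases hf : pvFq rest 0 with
        | none => simp [pvLoopS, pvFq, he, ih 0, hf]
        | some q' => simp [pvLoopS, pvFq, he, ih 0, hf, List.take_succ_cons]
    · cases hf : pvFq rest (if c = '\\' then run + 1 else 0) with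
      | none => simp [pvLoopS, pvFq, hq, ih, hf]
      | some q' => simp [pvLoopS, pvFq, hq, ih, hf, List.take_succ_cons]

-- --- pvSegs unfolding by fq ---
theorem pvSegs_fq (cs : List Char) (cur : List Char) (inq : Bool) (run : Nat) :
    pvSegs cs cur inq run =
      (match pvFq cs run with
       | none => [(inq, cur ++ cs)]
       | some q =>
         if inq then (true, cur ++ cs.take (q+1)) :: pvSegs (cs.drop (q+1)) [] false 0
         else (false, cur ++ cs.take q) :: pvSegs (cs.drop (q+1)) ['"'] true 0) := by
  induction cs generalizing cur inq run with
  | nil => simp [pvSegs, pvFq]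
  | cons c rest ih =>
    conv_lhs => rw [pvSegs]
    rw [pvFq]
    by_cases hc : (c = '"' ∧ run % 2 = 0)
    · rw [if_pos hc, if_pos hc]
      obtain ⟨hc1, _⟩ := hc
      subst hc1
      cases inq <;> simp
    · rw [if_neg hc, if_neg hc]
      rw [ih]
      cases pvFq rest (if c = '\\' then run + 1 else 0) with
      | none => simp
      | some q' => cases inq <;> simp [List.take_succ_cons]

-- --- the glue: loopS equals render ∘ segs ---
theorem pvLoopS_render (old new : List Char) (hq : '"' ∉ old) :
    ∀ n cs run, cs.length ≤ n →
      (pvLoopS old new cs run false = pvRender old new (pvSegs cs [] false run) ∧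
       '"' :: pvLoopS old new cs run true = pvRender old new (pvSegs cs ['"'] true run)) := by
  have hrepl : ∀ piece : List Char, pvRepl piece old new 0 0 [] = pvStep old new piece := by
    intro piece
    rw [pvRepl_eq_step piece old new 0 0 [] (le_refl 0) (fun m h1 h2 => absurd h2 (by omega))]
    simp
  intro n
  induction n with
  | zero =>
    intro cs run hn
    have hcs : cs = [] := List.eq_nil_of_length_eq_zero (by omega)
    subst hcs
    constructor
    · rw [pvSegs_fq]
      simp only [pvFq, List.nil_append]
      unfold pvRender
      simp [hrepl, pvStep, pvLoopS]
    · rw [pvSegs_fq]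
      simp only [pvFq, List.append_nil]
      unfold pvRender
      simp [pvLoopS]
  | succ n ih =>
    intro cs run hn
    have hne : ∀ q, pvFq cs run = some q → 1 ≤ cs.length := by
      intro q hf
      have := (pvFq_at cs run q hf).1
      omega
    constructor
    · rcases hf : pvFq cs run with _ | q
      · rw [pvLoopS_code_none old new hq cs run hf]
        rw [pvSegs_fq, hf]
        unfold pvRender
        simp [hrepl]
      · rw [pvLoopS_code_some old new hq cs run q hf]
        rw [pvSegs_fq, hf]
        simp only [Bool.false_eq_true, if_false]
        have hih := (ih (cs.drop (q+1)) 0 (by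
          have := hne q hf
          simp
          omega)).2
        unfold pvRender at hih ⊢
        simp only [List.map_cons, List.flatten_cons, List.nil_append]
        rw [← hih]
        simp [hrepl]
    · rcases hf : pvFq cs run with _ | q
      · rw [pvLoopS_str old new cs run, hf]
        rw [pvSegs_fq, hf]
        unfold pvRender
        simp
      · rw [pvLoopS_str old new cs run, hf]
        rw [pvSegs_fq, hf]
        simp only [if_true]
        have hq' := pvFq_at cs run q hf
        have htake : cs.take (q+1) = cs.take q ++ ['"'] := by
          rw [List.take_succ]
          have : cs[q]? = some '"' := by
            rw [List.getElem?_eq_getElem hq'.1]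
            have := hq'.2
            simp [List.getD_eq_getElem?_getD, List.getElem?_eq_getElem hq'.1] at this
            simp [this]
          rw [this]
          rfl
        have hih := (ih (cs.drop (q+1)) 0 (by
          have := hne q hf
          simp
          omega)).1
        unfold pvRender at hih ⊢
        simp only [List.map_cons, List.flatten_cons, if_true]
        rw [← hih, htake]
        simp

-- --- loopA equals loopS ---
theorem pvLoopA_eq_loopS (ir old new : List Char) :
    ∀ n i inq out, ir.length - i ≤ n →
      pvLoopA ir old new i inq out = out ++ pvLoopS old new (ir.drop i) (pvRun (ir.take i)) inq := by
  intro n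
  induction n with
  | zero =>
    intro i inq out hn
    rw [pvLoopA, dif_neg (by omega)]
    rw [List.drop_eq_nil_of_le (by omega : ir.length ≤ i)]
    simp [pvLoopS]
  | succ n ih =>
    intro i inq out hn
    by_cases hlt : i < ir.length
    · have hdrop : ir.drop i = ir[i] :: ir.drop (i+1) := List.drop_eq_getElem_cons hlt
      have hsnoc : pvRun (ir.take (i+1)) = if ir[i] = '\\' then pvRun (ir.take i) + 1 else 0 := by
        have ht : ir.take (i+1) = ir.take i ++ [ir[i]] := by
          rw [List.take_succ]
          simp [List.getElem?_eq_getElem hlt]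
        rw [ht]
        exact pvRunA_snoc 0 (ir.take i) ir[i]
      have e2 : ir.getD (i + 1 + old.length) ' ' = (ir.drop (i+1)).getD old.length ' ' := by
        simp [List.getD_eq_getElem?_getD, List.getElem?_drop]
      have e3 : (i + 1 + old.length ≥ ir.length) ↔ (old.length ≥ (ir.drop (i+1)).length) := by
        simp [List.length_drop]; omega
      rw [pvLoopA, dif_pos hlt]
      by_cases hq : ir[i] = '"'
      · rw [if_pos hq]
        rw [ih (i+1) _ _ (by omega)]
        rw [hdrop, pvLoopS, if_pos hq]
        have h0 : pvRun (ir.take (i+1)) = 0 := by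
          rw [hsnoc, hq]
          simp
        rw [h0, pvBsA_eq_run ir i (by omega)]
        simp
      · by_cases hm : (inq = false ∧ ir[i] = '@' ∧ old.isPrefixOf (ir.drop (i+1)))
        · obtain ⟨hinq, hat, hpref⟩ := hm
          subst hinq
          rw [if_neg hq, if_pos ⟨rfl, hat, hpref⟩]
          by_cases hb : (i + 1 + old.length ≥ ir.length ∨
              pvIsSym (ir.getD (i + 1 + old.length) ' ') = false)
          · rw [if_pos hb]
            rw [ih (i + 1 + old.length) _ _ (by omega)]
            have hbt : old.length ≥ (ir.drop (i+1)).length ∨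
                pvIsSym ((ir.drop (i+1)).getD old.length ' ') = false := by
              rcases hb with hb | hb
              · exact Or.inl (e3.mp hb)
              · rw [e2] at hb
                exact Or.inr hb
            rw [hdrop, pvLoopS, if_neg hq, if_pos ⟨rfl, hat, hpref, hbt⟩]
            have hdd : (ir.drop (i+1)).drop old.length = ir.drop (i + 1 + old.length) := by
              rw [List.drop_drop]
            rw [hdd]
            by_cases hle : i + 1 + old.length ≤ ir.length
            · have htk : ir.take (i + 1 + old.length) = ir.take i ++ '@' :: old := by
                have h2 : old = (ir.drop (i+1)).take old.length :=
                  List.prefix_iff_eq_take.mp (List.isPrefixOf_iff_prefix.mp hpref)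
                have h1 : i + 1 + old.length = i + (old.length + 1) := by omega
                rw [h1, List.take_add, hdrop, hat, List.take_succ_cons, ← h2]
              have hrun : pvRun (ir.take (i + 1 + old.length)) = pvRun old := by
                rw [htk]
                unfold pvRun
                rw [pvRunA_append]
                exact pvRunA_at_old _ old
              rw [hrun]
              simp
            · have hnil : ir.drop (i + 1 + old.length) = [] :=
                List.drop_eq_nil_of_le (by omega)
              rw [hnil]
              simp [pvLoopS]
          · rw [if_neg hb]
            rw [ih (i+1) _ _ (by omega)]
            have hbt : ¬ (old.length ≥ (ir.drop (i+1)).length ∨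
                pvIsSym ((ir.drop (i+1)).getD old.length ' ') = false) := by
              intro hx
              apply hb
              rcases hx with hx | hx
              · exact Or.inl (e3.mpr hx)
              · rw [← e2] at hx
                exact Or.inr hx
            rw [hdrop, pvLoopS, if_neg hq, if_neg (by rintro ⟨_, _, _, hx⟩; exact hbt hx)]
            rw [hsnoc]
            simp
        · rw [if_neg hq, if_neg hm]
          rw [ih (i+1) _ _ (by omega)]
          rw [hdrop, pvLoopS, if_neg hq, if_neg (by rintro ⟨h1, h2, h3, _⟩; exact hm ⟨h1, h2, h3⟩)]
          rw [hsnoc]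
          simp
    · rw [pvLoopA, dif_neg hlt]
      rw [List.drop_eq_nil_of_le (by omega : ir.length ≤ i)]
      simp [pvLoopS]

-- ===== VERDICT (by name: the statement is the Claim_ definition above) =====
theorem rename_symbol_refs_py_spec : Claim_equal_rename_symbol_refs_py := by
  intro ir old new _hdom hpre
  unfold Spec_rename_symbol_refs_py rename_symbol_refs_py rename_symbol_refs_py_alt
  have h1 := pvLoopA_eq_loopS ir.toList old.toList new.toList ir.toList.length 0 false [] (by omega)
  have h2 := (pvLoopS_render old.toList new.toList hpre ir.toList.length ir.toList 0 (le_refl _)).1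
  simp only [List.drop_zero, List.take_zero] at h1
  have h0 : pvRun ([] : List Char) = 0 := rfl
  rw [h0] at h1
  rw [h1, List.nil_append, h2]
  rfl
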